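-- pv_equiv track=rewrite | github.com/TPF-for-WSCA/ChampSim | aggregation_scripts/apply_merge_strategies.py | trim_mask
-- ===== SOURCE A (Python) =====
-- def trim_mask(mask):
--     started = False
--     last_bit_pos = 0
--     num_zero_bits = 0
--     trimmed_mask = []
--     for bit in mask:
--         if not bit and not started:
--             last_bit_pos += 1
--             continue
--         if bit:
--             last_bit_pos += num_zero_bits
--             last_bit_pos += 1
--             num_zero_bits = 0
--             started = True
--         elif not bit:
--             num_zero_bits += 1
--         trimmed_mask.append(bit)
--     return (
--         trimmed_mask[: -(len(mask) - last_bit_pos)]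
--         if (len(mask) - last_bit_pos) != 0
--         else trimmed_mask,
--         len(mask) - len(trimmed_mask),
--     )
-- ===== SOURCE B (Python) =====
-- def trim_mask(mask):
--     first = None
--     last = None
--     for i, bit in enumerate(mask):
--         if bit:
--             if first is None:
--                 first = i
--             last = i
--     if first is None:
--         return ([], len(mask))
--     return (list(mask[first:last + 1]), first)
-- ===== Notes on version B (the rewrite author's own statement) =====
-- stated objective: simpler
-- what changed: B replaces A's stateful build-list-then-slice-off-trailing-zeros loop (started flag, last_bit_pos, num_zero_bits counters) with one scan recording the first and last truthy indices, then a single slice mask[first:last+1] with first as the leading-zero count.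
import Mathlib
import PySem

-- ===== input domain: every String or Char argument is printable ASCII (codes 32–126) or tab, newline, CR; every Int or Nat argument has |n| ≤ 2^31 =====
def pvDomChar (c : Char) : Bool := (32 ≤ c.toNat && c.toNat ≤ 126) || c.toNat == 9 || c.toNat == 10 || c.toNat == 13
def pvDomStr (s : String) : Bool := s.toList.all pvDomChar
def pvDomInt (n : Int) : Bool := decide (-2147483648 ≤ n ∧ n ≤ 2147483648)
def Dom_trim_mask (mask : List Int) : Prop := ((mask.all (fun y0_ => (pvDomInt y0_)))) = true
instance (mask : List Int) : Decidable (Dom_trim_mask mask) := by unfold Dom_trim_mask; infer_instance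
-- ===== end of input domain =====

-- B trims the mask by recording the first and last truthy indices in one scan and taking a single
-- slice, instead of A's flag-and-counter loop that builds a list and slices trailing zeros off; simpler, same cost.

-- ===== PORT A =====
-- loop body of A: state = (started, last_bit_pos, num_zero_bits, trimmed_mask)
def stepA (s : Bool × Int × Int × List Int) (bit : Int) : Bool × Int × Int × List Int :=
  if bit = 0 ∧ s.1 = false then (s.1, s.2.1 + 1, s.2.2.1, s.2.2.2)
  else if bit ≠ 0 then (true, s.2.1 + s.2.2.1 + 1, 0, s.2.2.2 ++ [bit])
  else (s.1, s.2.1, s.2.2.1 + 1, s.2.2.2 ++ [bit])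

def trim_mask (mask : List Int) : List Int × Int :=
  let s := mask.foldl stepA (false, 0, 0, [])
  let rem : Int := (mask.length : Int) - s.2.1
  ((if rem ≠ 0 then PySem.List.slice s.2.2.2 none (some (-rem)) else s.2.2.2),
   (mask.length : Int) - (s.2.2.2.length : Int))

-- ===== PORT B =====
-- loop body of B: state = (first, last)
def stepB (s : Option Int × Option Int) (p : Int × Int) : Option Int × Option Int :=
  if p.2 ≠ 0 then ((if s.1.isNone then some p.1 else s.1), some p.1) else s

def trim_mask_alt (mask : List Int) : List Int × Int :=
  match (PySem.List.enumerate mask).foldl stepB (none, none) with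
  | (some f, some l) => (PySem.List.slice mask (some f) (some (l + 1)), f)
  | _ => ([], (mask.length : Int))

-- ===== PRECONDITION & SPEC =====
def Spec_trim_mask (mask : List Int) (out : List Int × Int) : Prop := out = trim_mask_alt mask
instance (mask : List Int) (out : List Int × Int) : Decidable (Spec_trim_mask mask out) := by unfold Spec_trim_mask; infer_instance

-- ===== CLAIM (what is proved, stated in full; the proofs are below) =====
def Claim_equal_trim_mask : Prop := ∀ (mask : List Int), Dom_trim_mask mask → Spec_trim_mask mask (trim_mask mask)

-- ===== LEMMAS AND PROOFS =====

def allZero (xs : List Int) : Bool := xs.all (· == 0)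

def tzf : List Int → Nat
  | [] => 0
  | x :: r => if allZero r then (if x == 0 then r.length + 1 else r.length) else tzf r

def G (n : Nat) (xs : List Int) : Nat := if allZero xs then n + xs.length else tzf xs

theorem allZero_cons (x : Int) (r : List Int) :
    allZero (x :: r) = ((x == 0) && allZero r) := by
  simp [allZero]

theorem tzf_cons_of_not_all (x : Int) (r : List Int) (hz : allZero r = false) :
    tzf (x :: r) = tzf r := by
  simp [tzf, hz]

theorem Astart (xs : List Int) : ∀ (last : Int) (n : Nat) (acc : List Int),
    xs.foldl stepA (true, last, (n : Int), acc)
      = (true, last + n + xs.length - (G n xs : Int), (G n xs : Int), acc ++ xs) := by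
  induction xs with
  | nil => intro last n acc; simp [G, allZero]
  | cons x r ih =>
    intro last n acc
    by_cases hx : x = 0
    · subst hx
      have hstep : stepA (true, last, (n : Int), acc) 0 = (true, last, ((n+1 : Nat) : Int), acc ++ [0]) := by
        simp [stepA]
      rw [List.foldl_cons, hstep, ih last (n+1) (acc ++ [0])]
      have hG : G n ((0:Int) :: r) = G (n+1) r := by
        by_cases hz : allZero r
        · simp only [G, allZero_cons, hz, List.length_cons]; simp; omega
        · have hz' : allZero r = false := by simpa using hz
          simp only [G, allZero_cons, hz', List.length_cons, tzf_cons_of_not_all _ r hz']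
          simp
      rw [hG]
      have h2 : last + ((n+1:Nat) : Int) + (r.length : Int) - (G (n+1) r : Int)
          = last + (n:Int) + (((0:Int) :: r).length : Int) - (G (n+1) r : Int) := by
        simp only [List.length_cons]; push_cast; ring
      rw [h2]
      simp
    · have hstep : stepA (true, last, (n : Int), acc) x = (true, last + n + 1, ((0 : Nat) : Int), acc ++ [x]) := by
        simp [stepA, hx]
      rw [List.foldl_cons, hstep, ih (last + n + 1) 0 (acc ++ [x])]
      have hG : G n (x :: r) = G 0 r := by
        have hxb : (x == 0) = false := by simp [hx]
        by_cases hz : allZero r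
        · simp only [G, allZero_cons, hxb, Bool.false_and, Bool.false_eq_true, if_false, tzf, hz, if_true, hxb]
          simp [hz]
        · have hz' : allZero r = false := by simpa using hz
          simp only [G, allZero_cons, hxb, Bool.false_and, Bool.false_eq_true, if_false,
            tzf_cons_of_not_all x r hz', hz']
      rw [hG]
      have h2 : last + (n:Int) + 1 + ((0:Nat) : Int) + (r.length : Int) - (G 0 r : Int)
          = last + (n:Int) + (((x) :: r).length : Int) - (G 0 r : Int) := by
        simp only [List.length_cons]; push_cast; ring
      rw [h2]
      simp

theorem Ashift (xs : List Int) : ∀ (k : Int),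
    xs.foldl stepA (false, k, 0, [])
      = (let s := xs.foldl stepA (false, 0, 0, []); (s.1, k + s.2.1, s.2.2.1, s.2.2.2)) := by
  induction xs with
  | nil => intro k; simp
  | cons x r ih =>
    intro k
    by_cases hx : x = 0
    · subst hx
      have h1 : stepA (false, k, 0, []) 0 = (false, k + 1, 0, []) := by simp [stepA]
      have h2 : stepA (false, 0, 0, []) 0 = (false, 1, 0, []) := by simp [stepA]
      rw [List.foldl_cons, h1, List.foldl_cons, h2, ih (k+1), ih 1]
      simp only []
      congr 2
      ring
    · have h1 : stepA (false, k, 0, []) x = (true, k + 1, ((0:Nat) : Int), [x]) := by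
        simp [stepA, hx]
      have h2 : stepA (false, 0, 0, []) x = (true, 1, ((0:Nat) : Int), [x]) := by
        simp [stepA, hx]
      rw [List.foldl_cons, h1, List.foldl_cons, h2, Astart r (k+1) 0 [x], Astart r 1 0 [x]]
      simp only []
      congr 2
      push_cast
      ring

def fNZ (xs : List Int) : Nat := (xs.takeWhile (· == 0)).length

def lNZ (xs : List Int) : Nat := xs.length - 1 - tzf xs

theorem tzf_lt (r : List Int) (h : allZero r = false) : tzf r < r.length := by
  induction r with
  | nil => simp [allZero] at h
  | cons x r ih =>
    by_cases hz : allZero r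
    · have hx : (x == 0) = false := by
        rw [allZero_cons, hz, Bool.and_true] at h
        exact h
      simp [tzf, hz, hx]
    · have hz' : allZero r = false := by simpa using hz
      have := ih hz'
      simp [tzf, hz']
      omega

theorem lNZ_cons_of_not_all (x : Int) (r : List Int) (hz : allZero r = false) :
    lNZ (x :: r) = lNZ r + 1 := by
  have h1 := tzf_lt r hz
  simp only [lNZ, tzf_cons_of_not_all x r hz, List.length_cons]
  omega

theorem lNZ_cons_of_all (x : Int) (r : List Int) (hz : allZero r = true) :
    lNZ (x :: r) = 0 := by
  simp only [lNZ, tzf, hz, if_true, List.length_cons]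
  by_cases hx : (x == 0) <;> simp [hx]

theorem fNZ_cons_zero (r : List Int) : fNZ ((0:Int) :: r) = fNZ r + 1 := by
  simp [fNZ]

theorem fNZ_cons_nonzero (x : Int) (r : List Int) (hx : x ≠ 0) : fNZ (x :: r) = 0 := by
  have hxb : (x == 0) = false := by simp [hx]
  simp [fNZ, hxb]

theorem Bstart (xs : List Int) : ∀ (k f l : Int),
    (PySem.List.enumerate xs k).foldl stepB (some f, some l)
      = (some f, some (if allZero xs then l else k + (lNZ xs : Int))) := by
  induction xs with
  | nil => intro k f l; simp [allZero, PySem.List.enumerate]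
  | cons x r ih =>
    intro k f l
    rw [PySem.List.enumerate_cons, List.foldl_cons]
    by_cases hx : x = 0
    · subst hx
      have hstep : stepB (some f, some l) (k, 0) = (some f, some l) := by simp [stepB]
      rw [hstep, ih (k+1) f l]
      rw [show allZero ((0:Int) :: r) = allZero r by simp [allZero_cons]]
      by_cases hz : allZero r
      · simp [hz]
      · have hz' : allZero r = false := by simpa using hz
        simp only [hz', Bool.false_eq_true, if_false, lNZ_cons_of_not_all _ r hz']
        congr 2
        push_cast; ring
    · have hstep : stepB (some f, some l) (k, x) = (some f, some k) := by
        simp [stepB, hx]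
      rw [hstep, ih (k+1) f k]
      have hxb : (x == 0) = false := by simp [hx]
      rw [show allZero (x :: r) = false by simp [allZero_cons, hxb]]
      simp only [Bool.false_eq_true, if_false]
      by_cases hz : allZero r
      · simp [hz, lNZ_cons_of_all x r hz]
      · have hz' : allZero r = false := by simpa using hz
        simp only [hz', Bool.false_eq_true, if_false, lNZ_cons_of_not_all x r hz']
        congr 2
        push_cast; ring

theorem Bnone (xs : List Int) : ∀ (k : Int),
    (PySem.List.enumerate xs k).foldl stepB (none, none)
      = (if allZero xs then ((none : Option Int), (none : Option Int))
         else (some (k + (fNZ xs : Int)), some (k + (lNZ xs : Int)))) := by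
  induction xs with
  | nil => intro k; simp [allZero, PySem.List.enumerate]
  | cons x r ih =>
    intro k
    rw [PySem.List.enumerate_cons, List.foldl_cons]
    by_cases hx : x = 0
    · subst hx
      have hstep : stepB ((none : Option Int), (none : Option Int)) (k, 0) = (none, none) := by
        simp [stepB]
      rw [hstep, ih (k+1)]
      rw [show allZero ((0:Int) :: r) = allZero r by simp [allZero_cons]]
      by_cases hz : allZero r
      · simp [hz]
      · have hz' : allZero r = false := by simpa using hz
        simp only [hz', Bool.false_eq_true, if_false, fNZ_cons_zero, lNZ_cons_of_not_all _ r hz']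
        congr 2 <;> · push_cast; ring
    · have hstep : stepB ((none : Option Int), (none : Option Int)) (k, x) = (some k, some k) := by
        simp [stepB, hx]
      rw [hstep, Bstart r (k+1) k k]
      have hxb : (x == 0) = false := by simp [hx]
      rw [show allZero (x :: r) = false by simp [allZero_cons, hxb]]
      simp only [Bool.false_eq_true, if_false, fNZ_cons_nonzero x r hx, Nat.cast_zero, add_zero]
      by_cases hz : allZero r
      · simp [hz, lNZ_cons_of_all x r hz]
      · have hz' : allZero r = false := by simpa using hz
        simp only [hz', Bool.false_eq_true, if_false, lNZ_cons_of_not_all x r hz']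
        congr 2
        push_cast; ring

theorem A_cons_zero (r : List Int) :
    trim_mask (0 :: r) = ((trim_mask r).1, (trim_mask r).2 + 1) := by
  unfold trim_mask
  have h1 : stepA (false, 0, 0, []) 0 = (false, 1, 0, []) := by simp [stepA]
  rw [List.foldl_cons, h1, Ashift r 1]
  simp only [List.length_cons]
  have heq : ((r.length + 1 : Nat) : Int) - (1 + (r.foldl stepA (false, 0, 0, [])).2.1)
      = (r.length : Int) - (r.foldl stepA (false, 0, 0, [])).2.1 := by push_cast; ring
  rw [heq]
  congr 1
  push_cast; ring

theorem B_cons_zero (r : List Int) :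
    trim_mask_alt (0 :: r) = ((trim_mask_alt r).1, (trim_mask_alt r).2 + 1) := by
  unfold trim_mask_alt
  rw [PySem.List.enumerate_cons]
  have hstep : stepB ((none : Option Int), (none : Option Int)) (0, 0) = (none, none) := by
    simp [stepB]
  rw [List.foldl_cons, hstep]
  simp only [zero_add]
  rw [Bnone r 1, Bnone r 0]
  by_cases hz : allZero r
  · simp [hz]
  · have hz' : allZero r = false := by simpa using hz
    simp only [hz', Bool.false_eq_true, if_false]
    have hfst : PySem.List.slice ((0:Int) :: r) (some (1 + (fNZ r : Int))) (some (1 + (lNZ r : Int) + 1))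
        = PySem.List.slice r (some ((fNZ r : Int))) (some ((lNZ r : Int) + 1)) := by
      have e1 : (1 + (fNZ r : Int)) = ((fNZ r + 1 : Nat) : Int) := by push_cast; ring
      have e2 : (1 + (lNZ r : Int) + 1) = ((lNZ r + 2 : Nat) : Int) := by push_cast; ring
      have e3 : ((lNZ r : Int) + 1) = ((lNZ r + 1 : Nat) : Int) := by push_cast; ring
      rw [e1, e2, e3, PySem.List.slice_natCast, PySem.List.slice_natCast]
      simp only [List.drop_succ_cons]
      congr 1
      omega
    rw [hfst]
    have h2 : (0:Int) + (fNZ r : Int) + 1 = 1 + (fNZ r : Int) := by ring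
    rw [h2]
    simp only [zero_add]

theorem A_closed (b : Int) (r : List Int) (hb : b ≠ 0) :
    trim_mask (b :: r) = ((b :: r).take (r.length + 1 - G 0 r), 0) := by
  unfold trim_mask
  have h1 : stepA (false, 0, 0, []) b = (true, 1, ((0:Nat) : Int), [b]) := by simp [stepA, hb]
  rw [List.foldl_cons, h1, Astart r 1 0 [b]]
  simp only [List.length_cons, List.singleton_append]
  have hrem : ((r.length + 1 : Nat) : Int) - (1 + ((0:Nat) : Int) + (r.length : Int) - (G 0 r : Int))
      = (G 0 r : Int) := by push_cast; ring
  rw [hrem]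
  congr 1
  · by_cases hzero : G 0 r = 0
    · simp [hzero]
    · have hpos : 0 < G 0 r := Nat.pos_of_ne_zero hzero
      have hne : ((G 0 r : Int)) ≠ 0 := by exact_mod_cast hzero
      rw [if_pos hne, PySem.List.slice_to_neg_natCast (b :: r) (G 0 r) hpos]
      simp only [List.length_cons]
  · push_cast; ring

theorem B_closed (b : Int) (r : List Int) (hb : b ≠ 0) :
    trim_mask_alt (b :: r) = ((b :: r).take (lNZ (b :: r) + 1), 0) := by
  unfold trim_mask_alt
  rw [Bnone (b :: r) 0]
  have hxb : (b == 0) = false := by simp [hb]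
  rw [show allZero (b :: r) = false by simp [allZero_cons, hxb]]
  simp only [Bool.false_eq_true, if_false, fNZ_cons_nonzero b r hb, Nat.cast_zero, add_zero, zero_add]
  have e : ((lNZ (b :: r) : Int) + 1) = ((lNZ (b :: r) + 1 : Nat) : Int) := by push_cast; ring
  rw [e]
  rw [PySem.List.slice_zero_start, PySem.List.slice_to_natCast]

theorem trim_eq (mask : List Int) : trim_mask mask = trim_mask_alt mask := by
  induction mask with
  | nil => rfl
  | cons x r ih =>
    by_cases hx : x = 0
    · subst hx
      rw [A_cons_zero, B_cons_zero, ih]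
    · rw [A_closed x r hx, B_closed x r hx]
      have htake : r.length + 1 - G 0 r = lNZ (x :: r) + 1 := by
        by_cases hz : allZero r
        · have h1 : G 0 r = r.length := by simp [G, hz]
          have h2 := lNZ_cons_of_all x r hz
          omega
        · have hz' : allZero r = false := by simpa using hz
          have hlt := tzf_lt r hz'
          have h1 : G 0 r = tzf r := by simp [G, hz']
          have h2 := lNZ_cons_of_not_all x r hz'
          have h3 : lNZ r = r.length - 1 - tzf r := rfl
          omega
      rw [htake]

-- ===== VERDICT (by name: the statement is the Claim_ definition above) =====
theorem trim_mask_spec : Claim_equal_trim_mask := by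
  intro mask _
  unfold Spec_trim_mask
  exact trim_eq mask
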